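-- pv_equiv track=rewrite | github.com/AAlsubari/dytr | src/dytr/tokenization/simple_tokenizer.py | _preprocess_text
-- ===== SOURCE A (Python) =====
-- from typing import Any, Dict, List, Optional, Union
--
-- def _preprocess_text(text: str) -> List[str]:
--     """Preprocess text for BPE tokenization."""
--     processed = []
--     for i, char in enumerate(text):
--         if char == " ":
--             processed.append("Ġ")
--         elif char == "\n":
--             count = 1
--             idx = i + 1
--             while idx < len(text) and text[idx] == "\n":
--                 count += 1
--                 idx += 1
--             processed.append("Ċ" * count)
--         elif char == "\t":
--             processed.append("ĉ")
--         else: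
--             processed.append(char)
--     return processed
-- ===== SOURCE B (Python) =====
-- from typing import Any, Dict, List, Optional, Union
--
-- def _preprocess_text(text: str) -> List[str]:
--     """Preprocess text for BPE tokenization.
--
--     Right-to-left pass: a running counter gives, at each newline, the
--     length of the consecutive-newline run starting there, with no rescanning.
--     """
--     out = []
--     run = 0
--     for ch in reversed(text):
--         if ch == "\n":
--             run += 1
--             out.append("Ċ" * run)
--         else:
--             run = 0
--             out.append("Ġ" if ch == " " else "ĉ" if ch == "\t" else ch)
--     out.reverse()
--     return out
-- ===== Notes on version B (the rewrite author's own statement) =====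
-- stated objective: alternative
-- what changed: Replaces the per-newline inner while-loop rescan of the run with a single right-to-left pass maintaining a running consecutive-newline counter, then reversing the output.
import Mathlib
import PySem

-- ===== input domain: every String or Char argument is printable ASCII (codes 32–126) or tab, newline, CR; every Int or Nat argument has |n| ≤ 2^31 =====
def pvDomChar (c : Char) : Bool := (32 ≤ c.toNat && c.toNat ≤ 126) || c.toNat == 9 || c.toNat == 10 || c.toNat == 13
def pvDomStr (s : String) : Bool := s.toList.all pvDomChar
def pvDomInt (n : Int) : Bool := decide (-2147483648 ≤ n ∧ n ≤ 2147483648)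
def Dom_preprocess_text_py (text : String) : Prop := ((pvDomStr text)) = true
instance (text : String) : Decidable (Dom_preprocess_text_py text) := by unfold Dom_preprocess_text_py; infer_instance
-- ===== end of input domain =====

-- B replaces A's per-newline inner rescan of the newline run by a single
-- right-to-left pass with a running consecutive-newline counter (objective: alternative).

-- ===== PORT A =====
-- the inner `while idx < len(text) and text[idx] == "\n": count += 1; idx += 1` loop
def pvAWhile (cs : List Char) (count : Int) (idx : Int) : Int :=
  if _h : idx < (cs.length : Int) ∧ PySem.List.pyGet? cs idx = some '\n' then
    pvAWhile cs (count + 1) (idx + 1)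
  else count
termination_by ((cs.length : Int) - idx).toNat
decreasing_by omega

def preprocess_text_py (text : String) : List String :=
  (PySem.List.enumerate text.toList).foldl
    (fun processed p =>
      if p.2 = ' ' then processed ++ ["Ġ"]
      else if p.2 = '\n' then
        let count := pvAWhile text.toList 1 (p.1 + 1)
        processed ++ [String.mk (List.replicate count.toNat 'Ċ')]
      else if p.2 = '\t' then processed ++ ["ĉ"]
      else processed ++ [String.mk [p.2]]) []

-- ===== PORT B =====
def preprocess_text_py_alt (text : String) : List String :=
  (text.toList.reverse.foldl
    (fun (st : List String × Int) ch =>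
      if ch = '\n' then
        (st.1 ++ [String.mk (List.replicate (st.2 + 1).toNat 'Ċ')], st.2 + 1)
      else
        (st.1 ++ [if ch = ' ' then "Ġ" else if ch = '\t' then "ĉ" else String.mk [ch]], 0))
    ([], 0)).1.reverse

-- ===== PRECONDITION & SPEC =====
def Spec_preprocess_text_py (text : String) (out : List String) : Prop := out = preprocess_text_py_alt text
instance (text : String) (out : List String) : Decidable (Spec_preprocess_text_py text out) := by unfold Spec_preprocess_text_py; infer_instance

-- ===== CLAIM (what is proved, stated in full; the proofs are below) =====
def Claim_equal_preprocess_text_py : Prop := ∀ (text : String), Dom_preprocess_text_py text → Spec_preprocess_text_py text (preprocess_text_py text)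

-- ===== LEMMAS AND PROOFS =====

/-- length of the leading run of newlines -/
def pvLeadNL : List Char → Nat
  | [] => 0
  | c :: rest => if c = '\n' then pvLeadNL rest + 1 else 0

/-- the token both programs emit for head char `c` followed by `rest` -/
def pvTok (c : Char) (rest : List Char) : String :=
  if c = ' ' then "Ġ"
  else if c = '\n' then String.mk (List.replicate (1 + pvLeadNL rest) 'Ċ')
  else if c = '\t' then "ĉ"
  else String.mk [c]

/-- common specification of the output -/
def pvSpecList : List Char → List String
  | [] => []
  | c :: rest => pvTok c rest :: pvSpecList rest

theorem pvAWhile_eq (cs : List Char) (count idx : Int) (h0 : 0 ≤ idx) :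
    pvAWhile cs count idx = count + (pvLeadNL (cs.drop idx.toNat) : Int) := by
  fun_induction pvAWhile cs count idx with
  | case1 count idx h ih =>
    obtain ⟨hlt, hget⟩ := h
    rw [ih (by omega)]
    have hidx : idx.toNat < cs.length := by omega
    have hdrop : cs.drop idx.toNat = cs[idx.toNat] :: cs.drop (idx.toNat + 1) :=
      List.drop_eq_getElem_cons hidx
    have hc : cs[idx.toNat] = '\n' := by
      have h := hget
      simp [PySem.List.pyGet?, PySem.List.pyIdx?, h0, hlt] at h
      exact h
    have h1 : (idx + 1).toNat = idx.toNat + 1 := by omega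
    rw [h1, hdrop]
    simp [pvLeadNL, hc]
    omega
  | case2 count idx h =>
    rcases Decidable.not_and_iff_or_not.mp h with hlt | hget
    · have hle : cs.length ≤ idx.toNat := by omega
      simp [List.drop_eq_nil_of_le hle, pvLeadNL]
    · by_cases hidx : idx.toNat < cs.length
      · have hdrop : cs.drop idx.toNat = cs[idx.toNat] :: cs.drop (idx.toNat + 1) :=
          List.drop_eq_getElem_cons hidx
        have hc : cs[idx.toNat] ≠ '\n' := by
          intro hc
          apply hget
          have hlt2 : idx < (cs.length : Int) := by omega
          simp [PySem.List.pyGet?, PySem.List.pyIdx?, h0, hlt2,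
                List.getElem?_eq_some_iff, hidx, hc]
        rw [hdrop]; simp [pvLeadNL, hc]
      · have hle : cs.length ≤ idx.toNat := by omega
        simp [List.drop_eq_nil_of_le hle, pvLeadNL]

/-- the element A's loop body appends for pair `(i, c)` -/
def pvAElem (cs : List Char) (p : Int × Char) : String :=
  if p.2 = ' ' then "Ġ"
  else if p.2 = '\n' then String.mk (List.replicate (pvAWhile cs 1 (p.1 + 1)).toNat 'Ċ')
  else if p.2 = '\t' then "ĉ"
  else String.mk [p.2]

theorem pvA_foldl_map (text : String) :
    preprocess_text_py text = (PySem.List.enumerate text.toList).map (pvAElem text.toList) := by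
  unfold preprocess_text_py
  have hbody : (fun (processed : List String) (p : Int × Char) =>
      if p.2 = ' ' then processed ++ ["Ġ"]
      else if p.2 = '\n' then
        let count := pvAWhile text.toList 1 (p.1 + 1)
        processed ++ [String.mk (List.replicate count.toNat 'Ċ')]
      else if p.2 = '\t' then processed ++ ["ĉ"]
      else processed ++ [String.mk [p.2]])
      = fun processed p => processed ++ [pvAElem text.toList p] := by
    funext processed p
    simp only [pvAElem]
    split_ifs <;> rfl
  rw [hbody, PySem.List.foldl_append_singleton_eq_map]
  simp

theorem pvAElem_head (pre : List Char) (c : Char) (rest : List Char) :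
    pvAElem (pre ++ c :: rest) ((pre.length : Int), c) = pvTok c rest := by
  simp only [pvAElem, pvTok]
  split_ifs with h1 h2
  · rfl
  · -- newline case: the while loop counts the run after position `pre.length`
    have hnn : (0 : Int) ≤ (pre.length : Int) + 1 := by positivity
    rw [pvAWhile_eq _ _ _ hnn]
    have ht : ((pre.length : Int) + 1).toNat = pre.length + 1 := by omega
    have hdrop : (pre ++ c :: rest).drop (pre.length + 1) = rest := by
      rw [show pre.length + 1 = (pre ++ [c]).length by simp,
          show pre ++ c :: rest = (pre ++ [c]) ++ rest by simp]
      exact List.drop_left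
    rw [ht, hdrop]
    have : ((1 : Int) + (pvLeadNL rest : Int)).toNat = 1 + pvLeadNL rest := by omega
    rw [this]
  · rfl
  · rfl

theorem pvA_map_spec (pre suf : List Char) :
    (PySem.List.enumerate suf (pre.length : Int)).map (pvAElem (pre ++ suf)) = pvSpecList suf := by
  induction suf generalizing pre with
  | nil => simp [PySem.List.enumerate_nil, pvSpecList]
  | cons c rest ih =>
    rw [PySem.List.enumerate_cons]
    simp only [List.map_cons, pvSpecList]
    congr 1
    · exact pvAElem_head pre c rest
    · -- tail: shift `pre` by one
      have h := ih (pre ++ [c])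
      simpa using h

theorem pvA_spec (text : String) : preprocess_text_py text = pvSpecList text.toList := by
  rw [pvA_foldl_map]
  have h := pvA_map_spec [] text.toList
  simpa [PySem.List.enumerate] using h

theorem pvB_foldr (cs : List Char) :
    cs.foldr (fun ch (st : List String × Int) =>
      if ch = '\n' then
        (st.1 ++ [String.mk (List.replicate (st.2 + 1).toNat 'Ċ')], st.2 + 1)
      else
        (st.1 ++ [if ch = ' ' then "Ġ" else if ch = '\t' then "ĉ" else String.mk [ch]], 0))
      ([], 0)
    = ((pvSpecList cs).reverse, (pvLeadNL cs : Int)) := by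
  induction cs with
  | nil => simp [pvSpecList, pvLeadNL]
  | cons c rest ih =>
    simp only [List.foldr_cons, ih]
    by_cases hc : c = '\n'
    · subst hc
      simp [pvSpecList, pvTok, pvLeadNL, Nat.add_comm]
    · simp [pvSpecList, pvTok, pvLeadNL, hc]

theorem pvB_spec (text : String) : preprocess_text_py_alt text = pvSpecList text.toList := by
  unfold preprocess_text_py_alt
  rw [List.foldl_reverse, pvB_foldr]
  simp

-- ===== VERDICT (by name: the statement is the Claim_ definition above) =====
theorem preprocess_text_py_spec : Claim_equal_preprocess_text_py := by
  intro text _hdom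
  unfold Spec_preprocess_text_py
  rw [pvA_spec, pvB_spec]
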